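-- pv_equiv track=rewrite | github.com/vicharak-in/Axon-NPU-Guide | examples/rkllm/inference.py | cpu_mask_for_platform
-- ===== SOURCE A (Python) =====
-- def cpu_mask_for_platform(platform: str, enabled_cpus_num: int) -> int:
--     if platform in {"rk3576", "rk3588"}:
--         max_cpus = 8
--     elif platform in {"rk3562", "rv1126b"}:
--         max_cpus = 4
--     else:
--         max_cpus = 8
--
--     if enabled_cpus_num <= 0 or enabled_cpus_num > max_cpus:
--         raise ValueError(
--             f"enabled-cpus-num must be in the range [1, {max_cpus}] for platform {platform}"
--         )
--
--     mask = 0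
--     for cpu in range(enabled_cpus_num):
--         mask |= 1 << cpu
--     return mask
-- ===== SOURCE B (Python) =====
-- _MAX_CPUS = {"rk3576": 8, "rk3588": 8, "rk3562": 4, "rv1126b": 4}
--
--
-- def cpu_mask_for_platform(platform: str, enabled_cpus_num: int) -> int:
--     max_cpus = _MAX_CPUS.get(platform, 8)
--     if not (1 <= enabled_cpus_num <= max_cpus):
--         raise ValueError(
--             f"enabled-cpus-num must be in the range [1, {max_cpus}] for platform {platform}"
--         )
--     return (1 << enabled_cpus_num) - 1
-- ===== Notes on version B (the rewrite author's own statement) =====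
-- stated objective: simpler
-- what changed: The if/elif platform dispatch is replaced by a single lookup in a module-level dict with default 8, and the bit-OR accumulation loop over range(enabled_cpus_num) is replaced by the closed form (1 << enabled_cpus_num) - 1.
import Mathlib
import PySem

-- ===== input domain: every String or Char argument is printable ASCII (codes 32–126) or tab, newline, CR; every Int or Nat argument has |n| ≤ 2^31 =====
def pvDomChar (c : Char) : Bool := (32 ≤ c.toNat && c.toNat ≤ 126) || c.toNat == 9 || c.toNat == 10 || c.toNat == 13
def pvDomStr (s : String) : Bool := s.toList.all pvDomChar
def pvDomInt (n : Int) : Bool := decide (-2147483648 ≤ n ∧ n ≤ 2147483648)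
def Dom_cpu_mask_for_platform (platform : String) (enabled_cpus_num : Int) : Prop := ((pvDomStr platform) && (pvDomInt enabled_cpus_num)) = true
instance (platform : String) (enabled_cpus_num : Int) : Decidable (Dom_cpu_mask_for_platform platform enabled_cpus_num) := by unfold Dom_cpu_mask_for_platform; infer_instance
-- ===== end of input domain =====

-- B replaces the if/elif platform dispatch by a dict lookup with default and the bit-OR loop by the closed form (1 << n) - 1 (objective: simpler).
-- ===== PORT A =====
def cpu_mask_for_platform (platform : String) (enabled_cpus_num : Int) : Int :=
  let max_cpus : Int := if platform = "rk3576" ∨ platform = "rk3588" then 8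
    else if platform = "rk3562" ∨ platform = "rv1126b" then 4
    else 8
  if enabled_cpus_num ≤ 0 ∨ enabled_cpus_num > max_cpus then 0  -- ValueError path, excluded by Pre_
  else (PySem.List.pyRange 0 enabled_cpus_num 1).foldl (fun mask cpu => Int.lor mask ((1 : Int) <<< cpu.toNat)) 0

-- ===== PORT B =====
def pvMaxCpusTable : PySem.Dict String Int :=
  PySem.Dict.ofList [("rk3576", 8), ("rk3588", 8), ("rk3562", 4), ("rv1126b", 4)]

def cpu_mask_for_platform_alt (platform : String) (enabled_cpus_num : Int) : Int :=
  let max_cpus : Int := PySem.Dict.getD pvMaxCpusTable platform 8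
  if ¬ (1 ≤ enabled_cpus_num ∧ enabled_cpus_num ≤ max_cpus) then 0  -- ValueError path, excluded by Pre_
  else ((1 : Int) <<< enabled_cpus_num.toNat) - 1

-- ===== PRECONDITION & SPEC =====
-- Pre_ excludes exactly the inputs on which A raises ValueError (enabled_cpus_num outside [1, max_cpus]).
def pvMaxCpus (platform : String) : Int :=
  if platform = "rk3576" ∨ platform = "rk3588" then 8
  else if platform = "rk3562" ∨ platform = "rv1126b" then 4
  else 8
def Pre_cpu_mask_for_platform (platform : String) (enabled_cpus_num : Int) : Prop :=
  1 ≤ enabled_cpus_num ∧ enabled_cpus_num ≤ pvMaxCpus platform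
instance (platform : String) (enabled_cpus_num : Int) : Decidable (Pre_cpu_mask_for_platform platform enabled_cpus_num) := by unfold Pre_cpu_mask_for_platform; infer_instance
def pvWitness_cpu_mask_for_platform : String × Int := ("rk3588", 4)
def Spec_cpu_mask_for_platform (platform : String) (enabled_cpus_num : Int) (out : Int) : Prop := out = cpu_mask_for_platform_alt platform enabled_cpus_num
instance (platform : String) (enabled_cpus_num : Int) (out : Int) : Decidable (Spec_cpu_mask_for_platform platform enabled_cpus_num out) := by unfold Spec_cpu_mask_for_platform; infer_instance

-- ===== CLAIM (what is proved, stated in full; the proofs are below) =====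
def Claim_equal_cpu_mask_for_platform : Prop := ∀ (platform : String) (enabled_cpus_num : Int), Dom_cpu_mask_for_platform platform enabled_cpus_num → Pre_cpu_mask_for_platform platform enabled_cpus_num → Spec_cpu_mask_for_platform platform enabled_cpus_num (cpu_mask_for_platform platform enabled_cpus_num)

-- ===== LEMMAS AND PROOFS =====
-- The dict lookup agrees with the if/elif dispatch.
theorem pvTable_eq_max (platform : String) :
    PySem.Dict.getD pvMaxCpusTable platform 8 = pvMaxCpus platform := by
  unfold pvMaxCpusTable pvMaxCpus
  by_cases h1 : platform = "rk3576"
  · subst h1; decide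
  by_cases h2 : platform = "rk3588"
  · subst h2; decide
  by_cases h3 : platform = "rk3562"
  · subst h3; decide
  by_cases h4 : platform = "rv1126b"
  · subst h4; decide
  · have g1 : ¬("rk3576" = platform) := fun h => h1 h.symm
    have g2 : ¬("rk3588" = platform) := fun h => h2 h.symm
    have g3 : ¬("rk3562" = platform) := fun h => h3 h.symm
    have g4 : ¬("rv1126b" = platform) := fun h => h4 h.symm
    simp [show PySem.Dict.ofList [("rk3576", (8:Int)), ("rk3588", 8), ("rk3562", 4), ("rv1126b", 4)]
            = PySem.Dict.mk [("rk3576", 8), ("rk3588", 8), ("rk3562", 4), ("rv1126b", 4)] from rfl,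
          PySem.Dict.getD_eq_get?_getD, PySem.Dict.get?_mk_cons, g1, g2, g3, g4,
          PySem.Dict.get?, h1, h2, h3, h4]

-- ===== VERDICT (by name: the statement is the Claim_ definition above) =====
theorem cpu_mask_for_platform_spec : Claim_equal_cpu_mask_for_platform := by
  intro platform n _ hpre
  obtain ⟨h1, h2⟩ := hpre
  have h8 : n ≤ 8 := by
    unfold pvMaxCpus at h2; split_ifs at h2 <;> omega
  unfold Spec_cpu_mask_for_platform cpu_mask_for_platform cpu_mask_for_platform_alt
  rw [pvTable_eq_max]
  have hmask : (PySem.List.pyRange 0 n 1).foldl (fun mask cpu => Int.lor mask ((1 : Int) <<< cpu.toNat)) 0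
        = ((1 : Int) <<< n.toNat) - 1 := by
    clear h2
    interval_cases n <;> decide
  show (if n ≤ 0 ∨ n > pvMaxCpus platform then (0 : Int)
        else (PySem.List.pyRange 0 n 1).foldl (fun mask cpu => Int.lor mask ((1 : Int) <<< cpu.toNat)) 0)
      = (if ¬ (1 ≤ n ∧ n ≤ pvMaxCpus platform) then 0 else ((1 : Int) <<< n.toNat) - 1)
  rw [if_neg (by omega), if_neg (not_not.mpr ⟨h1, h2⟩)]
  exact hmask
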